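-- pv_equiv track=rewrite | github.com/deynklarys/schedbuddy-ML | detection-model/sandbox.py | expand_multiline_rows
-- ===== SOURCE A (Python) =====
-- def expand_multiline_rows(row: dict[str, str]) -> list[dict[str, str]]:
--     """
--     Expand rows with with multiline values separated by newline into
--     per-schedule-entry dicts. If a column has fewer lines than
--     the max, the last known value is carried forward.
--
--     FIXME: Current implementation repeats the entire row data changing only
--     the values on multiline columns.
--
--     Current output:
--         {
--             "Code": "code",
--             "Subject": "subject",
--             "Units\nCredit Lee Lab": {
--                 "Credit": 3.0,
--                 "Lec": 2.0,
--                 "Lab": 1.0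
--             },
--             "Class": "class",
--             "Days": "TTh",
--             "Time": "04:00 PM - 07:00 PM",
--             "Room": "CS-02-104",
--             "Faculty": "faculty"
--             },
--             {
--             "Code": "code",
--             "Subject": "subject",
--             "Units\nCredit Lee Lab": {
--                 "Credit": 3.0,
--                 "Lec": 2.0,
--                 "Lab": 1.0
--             },
--             "Class": "class",
--             "Days": "T",
--             "Time": "10:00 AM - 12:00 PM",
--             "Room": "CS-02-104",
--             "Faculty": "faculty"
--         }
--     Goal output:
--         {
--             "Code": "code",
--             "Subject": "subject",
--             "Units": {
--                 "Credit": 3.0,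
--                 "Lec": 2.0,
--                 "Lab": 1.0
--             },
--             "Class": "BSCS-3A",
--             "Schedules": [
--                 {
--                     "Days": "day",
--                     "Time": "01:00 PM - 04:00 PM",
--                     "Room": "CS-02-201 CS-02-105",
--                     "Faculty": "class"
--                 },
--                 {
--                     "Days": "day",
--                     "Time": "01:00 PM - 04:00 PM",
--                     "Room": "CS-02-201 CS-02-105",
--                     "Faculty": "class"
--                 }
--             ]
--         }
--     """
--
--     split_rows = {
--         col: [line.strip() for line in val.split("\n") if line.strip()]
--         for col, val in row.items()
--     }
--
--     max_lines = max(len(lines) for lines in split_rows.values())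
--
--     entries = []
--     last_entry = {} # carry forward the last non-empty value per column
--
--     for i in range(max_lines):
--         entry = {}
--         for col, lines in split_rows.items():
--             if i < len(lines):
--                 entry[col] = lines[i]
--                 last_entry[col] = lines[i]
--             else:
--                 entry[col] = last_entry.get(col, "")
--
--         entries.append(entry)
--
--     return entries
-- ===== SOURCE B (Python) =====
-- def expand_multiline_rows(row: dict[str, str]) -> list[dict[str, str]]:
--     split_rows = {
--         col: [line.strip() for line in val.split("\n") if line.strip()]
--         for col, val in row.items()
--     }
--     max_lines = max(len(lines) for lines in split_rows.values())
--     padded = {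
--         col: lines + [lines[-1] if lines else ""] * (max_lines - len(lines))
--         for col, lines in split_rows.items()
--     }
--     return [{col: lines[i] for col, lines in padded.items()} for i in range(max_lines)]
-- ===== Notes on version B (the rewrite author's own statement) =====
-- stated objective: simpler
-- what changed: Replaces the mutable last_entry carry-forward dict and nested per-index loop by per-column padding (repeat last line, or empty strings) to max_lines followed by a transpose into entry dicts.
import Mathlib
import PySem

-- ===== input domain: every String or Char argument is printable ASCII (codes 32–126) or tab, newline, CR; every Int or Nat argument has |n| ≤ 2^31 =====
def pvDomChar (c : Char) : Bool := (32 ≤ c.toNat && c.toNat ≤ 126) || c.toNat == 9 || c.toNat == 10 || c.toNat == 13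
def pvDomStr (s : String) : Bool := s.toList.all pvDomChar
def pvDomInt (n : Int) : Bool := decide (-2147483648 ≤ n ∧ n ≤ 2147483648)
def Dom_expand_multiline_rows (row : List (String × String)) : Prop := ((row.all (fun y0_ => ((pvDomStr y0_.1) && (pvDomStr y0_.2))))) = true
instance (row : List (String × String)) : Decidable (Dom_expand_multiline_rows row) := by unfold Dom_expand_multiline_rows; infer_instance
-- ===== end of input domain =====

-- B replaces A's mutable last_entry carry-forward loop by per-column padding to max_lines
-- followed by a transpose (objective: simpler decomposition, same cost).

-- ===== PORT A =====
-- [line.strip() for line in val.split("\n") if line.strip()]  (identical line in both Pythons)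
def pvCleanLines (val : String) : List String :=
  (((PySem.Str.split? val "\n").getD []).filter (fun l => PySem.Str.strip l ≠ "")).map PySem.Str.strip

-- max(len(lines) for lines in split_rows.values())  (ValueError on empty → Pre_; identical line in both Pythons)
def pvMaxLines (split_rows : List (String × List String)) : Nat :=
  (PySem.List.max? (split_rows.map (fun p => p.2.length)) (fun x => x)).getD 0

def expand_multiline_rows (row : List (String × String)) : List (List (String × String)) :=
  let split_rows : List (String × List String) :=
    row.map (fun cv => (cv.1, pvCleanLines cv.2))
  let max_lines := pvMaxLines split_rows
  let final := (List.range max_lines).foldl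
    (fun (st : List (List (String × String)) × PySem.Dict String String) i =>
      let inner := split_rows.foldl
        (fun (st2 : PySem.Dict String String × PySem.Dict String String) cl =>
          if i < cl.2.length then
            (st2.1.insert cl.1 (cl.2.getD i ""), st2.2.insert cl.1 (cl.2.getD i ""))
          else
            (st2.1.insert cl.1 (st2.2.getD cl.1 ""), st2.2))
        (PySem.Dict.empty, st.2)
      (st.1 ++ [inner.1.items], inner.2))
    ([], PySem.Dict.empty)
  final.1

-- ===== PORT B =====
def expand_multiline_rows_alt (row : List (String × String)) : List (List (String × String)) :=
  let split_rows : List (String × List String) :=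
    row.map (fun cv => (cv.1, pvCleanLines cv.2))
  let max_lines := pvMaxLines split_rows
  let padded : List (String × List String) :=
    split_rows.map (fun cl =>
      (cl.1, cl.2 ++ List.replicate (max_lines - cl.2.length)
                        (if cl.2 = [] then "" else PySem.List.pyGetD cl.2 (-1) "")))
  (List.range max_lines).map (fun i => padded.map (fun cl => (cl.1, cl.2.getD i "")))

-- ===== PRECONDITION & SPEC =====
-- Pre_ excludes the empty dict, on which both Pythons raise ValueError (max() of an empty
-- sequence), and association lists with duplicate keys, which do not represent any Python
-- dict (the argument's type is dict[str, str]).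
def Pre_expand_multiline_rows (row : List (String × String)) : Prop :=
  row ≠ [] ∧ (row.map Prod.fst).Nodup
instance (row : List (String × String)) : Decidable (Pre_expand_multiline_rows row) := by
  unfold Pre_expand_multiline_rows; infer_instance

def pvWitness_expand_multiline_rows : (List (String × String)) :=
  [("Days", "TTh\nT"), ("Time", "04:00 PM"), ("Note", "")]

def Spec_expand_multiline_rows (row : List (String × String)) (out : List (List (String × String))) : Prop := out = expand_multiline_rows_alt row
instance (row : List (String × String)) (out : List (List (String × String))) : Decidable (Spec_expand_multiline_rows row out) := by unfold Spec_expand_multiline_rows; infer_instance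

-- ===== CLAIM (what is proved, stated in full; the proofs are below) =====
def Claim_equal_expand_multiline_rows : Prop := ∀ (row : List (String × String)), Dom_expand_multiline_rows row → Pre_expand_multiline_rows row → Spec_expand_multiline_rows row (expand_multiline_rows row)

-- ===== LEMMAS AND PROOFS =====

-- the value last_entry carries for a column with cleaned lines `ls` after the first n outer iterations
def pvCarry (n : Nat) (ls : List String) : String :=
  if n = 0 ∨ ls = [] then "" else ls.getD (min (n-1) (ls.length-1)) ""

lemma pvContains_insert_of_ne {e : PySem.Dict String String} {k k' : String} (v : String)
    (hne : k' ≠ k) (h : e.contains k' = false) : (e.insert k v).contains k' = false := by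
  rw [PySem.Dict.contains_eq_isSome_get?, PySem.Dict.get?_insert, if_neg hne,
      ← PySem.Dict.contains_eq_isSome_get?, h]

-- A's inner loop: the last_entry component evolves independently of the entry component
lemma pvInnerSnd (i : Nat) (sr : List (String × List String)) :
    ∀ (e last : PySem.Dict String String),
    (sr.foldl
      (fun (st2 : PySem.Dict String String × PySem.Dict String String) cl =>
        if i < cl.2.length then
          (st2.1.insert cl.1 (cl.2.getD i ""), st2.2.insert cl.1 (cl.2.getD i ""))
        else
          (st2.1.insert cl.1 (st2.2.getD cl.1 ""), st2.2))
      (e, last)).2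
    = sr.foldl (fun l cl => if i < cl.2.length then l.insert cl.1 (cl.2.getD i "") else l) last := by
  induction sr with
  | nil => intro e last; rfl
  | cons cl tl ih =>
      intro e last
      simp only [List.foldl_cons]
      by_cases h : i < cl.2.length
      · simp only [if_pos h]; exact ih _ _
      · simp only [if_neg h]; exact ih _ _

-- A's inner loop: the entry built in one outer iteration, as an items list
lemma pvInnerFst (i : Nat) (sr : List (String × List String)) :
    ∀ (e last : PySem.Dict String String),
    (sr.map Prod.fst).Nodup →
    (∀ cl ∈ sr, e.contains cl.1 = false) →
    (sr.foldl
      (fun (st2 : PySem.Dict String String × PySem.Dict String String) cl =>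
        if i < cl.2.length then
          (st2.1.insert cl.1 (cl.2.getD i ""), st2.2.insert cl.1 (cl.2.getD i ""))
        else
          (st2.1.insert cl.1 (st2.2.getD cl.1 ""), st2.2))
      (e, last)).1.items
    = e.items ++ sr.map (fun cl => (cl.1, if i < cl.2.length then cl.2.getD i "" else last.getD cl.1 "")) := by
  induction sr with
  | nil => intro e last _ _; simp
  | cons cl tl ih =>
      intro e last hnd he
      rw [List.map_cons, List.nodup_cons] at hnd
      obtain ⟨hhd, htl⟩ := hnd
      have hne' : ∀ cl' ∈ tl, cl'.1 ≠ cl.1 := by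
        intro cl' hcl' heq
        exact hhd (heq ▸ List.mem_map_of_mem hcl')
      have hecl : e.contains cl.1 = false := he cl (by simp)
      have hetl : ∀ v, ∀ cl' ∈ tl, (e.insert cl.1 v).contains cl'.1 = false := by
        intro v cl' hcl'
        exact pvContains_insert_of_ne v (hne' cl' hcl') (he cl' (by simp [hcl']))
      simp only [List.foldl_cons]
      by_cases h : i < cl.2.length
      · simp only [if_pos h]
        rw [ih _ _ htl (hetl _), PySem.Dict.items_insert_of_not_contains _ _ hecl,
            List.append_assoc, List.singleton_append]
        simp only [List.map_cons, if_pos h]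
        congr 2
        exact List.map_congr_left fun cl' hcl' => by
          rw [PySem.Dict.getD_insert_of_ne _ _ _ (hne' cl' hcl')]
      · simp only [if_neg h]
        rw [ih _ _ htl (hetl _), PySem.Dict.items_insert_of_not_contains _ _ hecl,
            List.append_assoc, List.singleton_append]
        simp only [List.map_cons, if_neg h]

-- a fold over columns whose keys avoid k leaves last_entry's value at k unchanged
lemma pvFoldGetD_not_mem (i : Nat) (tl : List (String × List String)) :
    ∀ (last : PySem.Dict String String) (k : String), k ∉ tl.map Prod.fst →
    (tl.foldl (fun l cl => if i < cl.2.length then l.insert cl.1 (cl.2.getD i "") else l) last).getD k ""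
      = last.getD k "" := by
  induction tl with
  | nil => intro last k _; rfl
  | cons cl tl ih =>
      intro last k hk
      simp only [List.map_cons, List.mem_cons, not_or] at hk
      simp only [List.foldl_cons]
      by_cases h : i < cl.2.length
      · simp only [if_pos h]
        rw [ih _ _ hk.2, PySem.Dict.getD_insert_of_ne _ _ _ hk.1]
      · simp only [if_neg h]; exact ih _ _ hk.2

lemma pvLastGetD (i : Nat) (sr : List (String × List String)) :
    ∀ (last : PySem.Dict String String),
    (sr.map Prod.fst).Nodup →
    ∀ cl ∈ sr,
      (sr.foldl (fun l cl => if i < cl.2.length then l.insert cl.1 (cl.2.getD i "") else l) last).getD cl.1 ""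
      = (if i < cl.2.length then cl.2.getD i "" else last.getD cl.1 "") := by
  induction sr with
  | nil => intro _ _ cl hcl; cases hcl
  | cons hd tl ih =>
      intro last hnd cl hcl
      rw [List.map_cons, List.nodup_cons] at hnd
      obtain ⟨hhd, htl⟩ := hnd
      simp only [List.foldl_cons]
      rcases List.mem_cons.mp hcl with rfl | hmem
      · by_cases h : i < cl.2.length
        · simp only [if_pos h]
          rw [pvFoldGetD_not_mem i tl _ _ hhd, PySem.Dict.getD_insert_self]
        · simp only [if_neg h]
          rw [pvFoldGetD_not_mem i tl _ _ hhd]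
      · have hne : cl.1 ≠ hd.1 := by
          intro heq
          exact hhd (heq ▸ List.mem_map_of_mem hmem)
        by_cases h : i < hd.2.length
        · simp only [if_pos h]
          rw [ih _ htl cl hmem, PySem.Dict.getD_insert_of_ne _ _ _ hne]
        · simp only [if_neg h]
          exact ih _ htl cl hmem

-- A's outer loop: entries so far are the transposed padded rows; last_entry carries pvCarry
lemma pvOuter (sr : List (String × List String)) (hnd : (sr.map Prod.fst).Nodup) (n : Nat) :
    ((List.range n).foldl
      (fun (st : List (List (String × String)) × PySem.Dict String String) i =>
        let inner := sr.foldl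
          (fun (st2 : PySem.Dict String String × PySem.Dict String String) cl =>
            if i < cl.2.length then
              (st2.1.insert cl.1 (cl.2.getD i ""), st2.2.insert cl.1 (cl.2.getD i ""))
            else
              (st2.1.insert cl.1 (st2.2.getD cl.1 ""), st2.2))
          (PySem.Dict.empty, st.2)
        (st.1 ++ [inner.1.items], inner.2))
      ([], PySem.Dict.empty)).1
      = (List.range n).map (fun i => sr.map (fun cl =>
          (cl.1, if i < cl.2.length then cl.2.getD i "" else pvCarry i cl.2)))
    ∧ ∀ cl ∈ sr,
      ((List.range n).foldl
        (fun (st : List (List (String × String)) × PySem.Dict String String) i =>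
          let inner := sr.foldl
            (fun (st2 : PySem.Dict String String × PySem.Dict String String) cl =>
              if i < cl.2.length then
                (st2.1.insert cl.1 (cl.2.getD i ""), st2.2.insert cl.1 (cl.2.getD i ""))
              else
                (st2.1.insert cl.1 (st2.2.getD cl.1 ""), st2.2))
            (PySem.Dict.empty, st.2)
          (st.1 ++ [inner.1.items], inner.2))
        ([], PySem.Dict.empty)).2.getD cl.1 "" = pvCarry n cl.2 := by
  induction n with
  | zero =>
      constructor
      · rfl
      · intro cl _; simp [pvCarry, PySem.Dict.getD_empty]
  | succ n ih =>
      obtain ⟨ih1, ih2⟩ := ih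
      rw [List.range_succ, List.foldl_append, List.map_append, List.foldl_cons, List.foldl_nil]
      have hemp : (PySem.Dict.empty : PySem.Dict String String).items = [] := rfl
      constructor
      · simp only
        rw [ih1, pvInnerFst n sr _ _ hnd (fun cl _ => PySem.Dict.contains_empty _), hemp,
            List.nil_append]
        congr 2
        refine List.map_congr_left (fun cl hcl => ?_)
        by_cases h : n < cl.2.length
        · simp [h]
        · simp only [if_neg h]
          rw [ih2 cl hcl]
      · intro cl hcl
        simp only
        rw [pvInnerSnd n sr, pvLastGetD n sr _ hnd cl hcl]
        by_cases h : n < cl.2.length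
        · have hne : cl.2 ≠ [] := by
            intro hcontra; rw [hcontra] at h; simp at h
          have hcond : ¬ (n + 1 = 0 ∨ cl.2 = []) := by
            rintro (hc | hc) <;> [omega; exact hne hc]
          simp only [if_pos h, pvCarry, if_neg hcond, Nat.add_sub_cancel]
          rw [Nat.min_eq_left (by omega)]
        · simp only [if_neg h]
          rw [ih2 cl hcl]
          by_cases hne : cl.2 = []
          · simp [pvCarry, hne]
          · have hlen : 0 < cl.2.length := List.length_pos_of_ne_nil hne
            have hc1 : ¬ (n = 0 ∨ cl.2 = []) := by
              rintro (hc | hc) <;> [omega; exact hne hc]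
            have hc2 : ¬ (n + 1 = 0 ∨ cl.2 = []) := by
              rintro (hc | hc) <;> [omega; exact hne hc]
            simp only [pvCarry, if_neg hc1, if_neg hc2, Nat.add_sub_cancel]
            rw [Nat.min_eq_right (by omega), Nat.min_eq_right (by omega)]

-- one transposed row of B equals A's entry at index i
lemma pvRowEq (sr : List (String × List String)) (m i : Nat)
    (hmax : ∀ cl ∈ sr, cl.2.length ≤ m) (hi : i < m) :
    sr.map (fun cl => (cl.1, if i < cl.2.length then cl.2.getD i "" else pvCarry i cl.2))
      = (sr.map (fun cl =>
          (cl.1, cl.2 ++ List.replicate (m - cl.2.length)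
            (if cl.2 = [] then "" else PySem.List.pyGetD cl.2 (-1) "")))).map
          (fun cl => (cl.1, cl.2.getD i "")) := by
  rw [List.map_map]
  refine List.map_congr_left (fun cl hcl => ?_)
  simp only [Function.comp]
  congr 1
  have hL : (cl.2 ++ List.replicate (m - cl.2.length)
      (if cl.2 = [] then "" else PySem.List.pyGetD cl.2 (-1) "")).length = m := by
    rw [List.length_append, List.length_replicate]
    have := hmax cl hcl
    omega
  by_cases h : i < cl.2.length
  · rw [if_pos h, List.getD_append _ _ _ _ h]
  · rw [if_neg h]
    rw [List.getD_eq_getElem _ _ (by rw [hL]; exact hi),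
        List.getElem_append_right (by omega), List.getElem_replicate]
    by_cases hne : cl.2 = []
    · rw [if_pos hne]
      simp [pvCarry, hne]
    · have hlen : 0 < cl.2.length := List.length_pos_of_ne_nil hne
      have hc : ¬ (i = 0 ∨ cl.2 = []) := by
        rintro (hc | hc) <;> [omega; exact hne hc]
      rw [if_neg hne, PySem.List.pyGetD_neg_one _ _ hne]
      simp only [pvCarry, if_neg hc]
      rw [Nat.min_eq_right (by omega), List.getLast_eq_getElem,
          List.getD_eq_getElem _ _ (by omega)]

-- ===== VERDICT (by name: the statement is the Claim_ definition above) =====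
theorem expand_multiline_rows_spec : Claim_equal_expand_multiline_rows := by
  intro row _ hpre
  obtain ⟨hne, hnd⟩ := hpre
  unfold Spec_expand_multiline_rows expand_multiline_rows expand_multiline_rows_alt
  simp only
  set sr : List (String × List String) := row.map (fun cv => (cv.1, pvCleanLines cv.2)) with hsr
  have hndsr : (sr.map Prod.fst).Nodup := by
    rw [hsr, List.map_map]
    simpa using hnd
  have hsrne : sr ≠ [] := by
    rw [hsr]; simpa using hne
  have hmax : ∀ cl ∈ sr, cl.2.length ≤ pvMaxLines sr := by
    intro cl hcl
    obtain ⟨m, hm⟩ : ∃ m, PySem.List.max? (sr.map (fun p => p.2.length)) (fun x => x) = some m := by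
      rcases hh : PySem.List.max? (sr.map (fun p => p.2.length)) (fun x => x) with _ | m
      · rw [PySem.List.max?_eq_none_iff] at hh
        exact absurd (List.map_eq_nil_iff.mp hh) hsrne
      · exact ⟨m, hh⟩
    have := PySem.List.max?_isMax hm cl.2.length (List.mem_map.mpr ⟨cl, hcl, rfl⟩)
    simpa [pvMaxLines, hm] using this
  rw [(pvOuter sr hndsr (pvMaxLines sr)).1]
  exact List.map_congr_left (fun i hi =>
    pvRowEq sr (pvMaxLines sr) i hmax (List.mem_range.mp hi))
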